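-- pv_equiv track=rewrite | github.com/Wout-Vanherf/ManoMapV2 | Python/detection.py | match_multiple_seq
-- ===== SOURCE A (Python) =====
-- def match_multiple_seq(sequences1,sequences2, amount_overlapped):
--     out = []
--     for seq1 in sequences1:
--         for seq2 in sequences2:
--             if match_single_seq(seq1, seq2, amount_overlapped):
--                 tmp = dict()
--                 tmp["sensors"] = seq2
--                 tmp["matches"] = seq1
--                 out.append(tmp)
--     return out
--
-- def match_single_seq(seq1, seq2, amount_overlapped):
--     tmp1 = []
--     for val in seq1:
--         tmp1.append(val[0])
--     tmp2 = []
--     for val in seq2: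
--         tmp2.append(val[0])
--     return len(set(tmp1) & set(tmp2)) >= amount_overlapped
-- ===== SOURCE B (Python) =====
-- def _first_set(seq):
--     s = set()
--     for v in seq:
--         s.add(v[0])
--     return s
--
-- def _build_inv(firsts2):
--     inv = {}
--     for j, f2 in enumerate(firsts2):
--         for v in f2:
--             inv.setdefault(v, []).append(j)
--     return inv
--
-- def _overlap_counts(f1, inv, n2):
--     counts = [0] * n2
--     for v in f1:
--         for j in inv.get(v, []):
--             counts[j] += 1
--     return counts
--
-- def match_multiple_seq(sequences1, sequences2, amount_overlapped):
--     firsts2 = [_first_set(seq) for seq in sequences2]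
--     inv = _build_inv(firsts2)
--     out = []
--     for seq1 in sequences1:
--         counts = _overlap_counts(_first_set(seq1), inv, len(sequences2))
--         for j, seq2 in enumerate(sequences2):
--             if counts[j] >= amount_overlapped:
--                 out.append({"sensors": seq2, "matches": seq1})
--     return out
-- ===== Notes on version B (the rewrite author's own statement) =====
-- stated objective: faster
-- what changed: replaces the per-pair rebuilding of both first-element sets and their intersection with first-element sets precomputed once plus an inverted index element->seq2-indices, so each seq1's overlap counts against all seq2 are accumulated in one pass
-- outside the precondition, e.g. on match_multiple_seq([], [[[]]], 1): A returns [], B raises IndexError; on match_multiple_seq([[[]]], [], 1): A returns [], B raises IndexError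
import Mathlib
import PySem

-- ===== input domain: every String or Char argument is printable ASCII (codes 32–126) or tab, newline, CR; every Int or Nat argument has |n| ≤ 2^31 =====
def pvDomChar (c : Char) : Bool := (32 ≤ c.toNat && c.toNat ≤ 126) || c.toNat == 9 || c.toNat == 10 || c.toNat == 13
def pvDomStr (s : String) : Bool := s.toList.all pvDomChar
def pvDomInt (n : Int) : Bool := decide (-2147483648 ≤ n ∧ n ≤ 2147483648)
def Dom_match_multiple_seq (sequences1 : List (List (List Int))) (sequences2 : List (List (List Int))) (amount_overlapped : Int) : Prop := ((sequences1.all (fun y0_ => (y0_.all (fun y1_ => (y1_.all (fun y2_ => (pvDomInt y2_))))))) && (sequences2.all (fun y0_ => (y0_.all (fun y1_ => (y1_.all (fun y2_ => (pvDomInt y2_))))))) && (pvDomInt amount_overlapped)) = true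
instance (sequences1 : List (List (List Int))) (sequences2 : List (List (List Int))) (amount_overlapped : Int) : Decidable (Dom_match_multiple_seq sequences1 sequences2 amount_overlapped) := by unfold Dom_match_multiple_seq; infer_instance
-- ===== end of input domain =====

-- ===== PORT A =====
-- B precomputes per-sequence first-element sets once and counts overlaps through an inverted index
-- element -> seq2-indices, instead of A's per-pair set rebuilding and intersection (objective: faster).
-- helper of A: match_single_seq (literal transliteration)
def match_single_seq (seq1 : List (List Int)) (seq2 : List (List Int)) (amount_overlapped : Int) : Bool :=
  let tmp1 := seq1.foldl (fun acc v => acc ++ [PySem.List.pyGetD v 0 0]) []   -- val[0]; default only reached outside Pre_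
  let tmp2 := seq2.foldl (fun acc v => acc ++ [PySem.List.pyGetD v 0 0]) []
  decide (amount_overlapped ≤ PySem.Set.len (PySem.Set.inter (PySem.Set.ofList tmp1) (PySem.Set.ofList tmp2)))

def match_multiple_seq (sequences1 : List (List (List Int))) (sequences2 : List (List (List Int))) (amount_overlapped : Int) : List (List (String × List (List Int))) :=
  sequences1.foldl (fun out seq1 =>
    sequences2.foldl (fun out seq2 =>
      if match_single_seq seq1 seq2 amount_overlapped then
        out ++ [(((PySem.Dict.empty.insert "sensors" seq2).insert "matches" seq1).items)]
      else out) out) []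

-- ===== PORT B =====
-- helper of B: _first_set
def pvFirstSetB (seq : List (List Int)) : PySem.Set Int :=
  seq.foldl (fun s v => PySem.Set.add s (PySem.List.pyGetD v 0 0)) PySem.Set.empty   -- v[0]; default only reached outside Pre_

-- helper of B: _build_inv
def pvBuildInv (firsts2 : List (PySem.Set Int)) : PySem.Dict Int (List Int) :=
  (PySem.List.enumerate firsts2 0).foldl (fun d p =>
    p.2.foldl (fun d v => d.modify v [] (· ++ [p.1])) d) PySem.Dict.empty

-- helper of B: _overlap_counts
def pvOverlapCounts (f1 : PySem.Set Int) (inv : PySem.Dict Int (List Int)) (n2 : Int) : List Int :=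
  let counts := PySem.List.pyRepeat [0] n2
  f1.foldl (fun c v =>
    (inv.getD v []).foldl (fun c j => PySem.List.pySetD c j (PySem.List.pyGetD c j 0 + 1)) c) counts

def match_multiple_seq_alt (sequences1 : List (List (List Int))) (sequences2 : List (List (List Int))) (amount_overlapped : Int) : List (List (String × List (List Int))) :=
  let firsts2 := sequences2.foldl (fun acc seq => acc ++ [pvFirstSetB seq]) []
  let inv := pvBuildInv firsts2
  sequences1.foldl (fun out seq1 =>
    let counts := pvOverlapCounts (pvFirstSetB seq1) inv (sequences2.length : Int)
    (PySem.List.enumerate sequences2 0).foldl (fun out p =>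
      if amount_overlapped ≤ PySem.List.pyGetD counts p.1 0 then
        out ++ [[("sensors", p.2), ("matches", seq1)]]
      else out) out) []

-- ===== PRECONDITION & SPEC =====
-- Pre_ excludes inputs containing an empty inner sequence: A raises IndexError on val[0] except in
-- the accidental corner where the opposite outer list is empty (A then returns [] without indexing,
-- while B, which precomputes the first-element sets of sequences2 unconditionally, raises IndexError).
def Pre_match_multiple_seq (sequences1 : List (List (List Int))) (sequences2 : List (List (List Int))) (amount_overlapped : Int) : Prop :=
  (∀ s ∈ sequences1, ∀ v ∈ s, v ≠ []) ∧ (∀ s ∈ sequences2, ∀ v ∈ s, v ≠ [])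
instance (sequences1 : List (List (List Int))) (sequences2 : List (List (List Int))) (amount_overlapped : Int) : Decidable (Pre_match_multiple_seq sequences1 sequences2 amount_overlapped) := by unfold Pre_match_multiple_seq; infer_instance

def pvWitness_match_multiple_seq : List (List (List Int)) × List (List (List Int)) × Int :=
  ([[[1], [2]]], [[[2], [3]]], 1)

def Spec_match_multiple_seq (sequences1 : List (List (List Int))) (sequences2 : List (List (List Int))) (amount_overlapped : Int) (out : List (List (String × List (List Int)))) : Prop := out = match_multiple_seq_alt sequences1 sequences2 amount_overlapped
instance (sequences1 : List (List (List Int))) (sequences2 : List (List (List Int))) (amount_overlapped : Int) (out : List (List (String × List (List Int)))) : Decidable (Spec_match_multiple_seq sequences1 sequences2 amount_overlapped out) := by unfold Spec_match_multiple_seq; infer_instance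

-- ===== CLAIM (what is proved, stated in full; the proofs are below) =====
def Claim_equal_match_multiple_seq : Prop := ∀ (sequences1 : List (List (List Int))) (sequences2 : List (List (List Int))) (amount_overlapped : Int), Dom_match_multiple_seq sequences1 sequences2 amount_overlapped → Pre_match_multiple_seq sequences1 sequences2 amount_overlapped → Spec_match_multiple_seq sequences1 sequences2 amount_overlapped (match_multiple_seq sequences1 sequences2 amount_overlapped)

-- ===== LEMMAS AND PROOFS =====

-- first element of an inner sequence (the default is never reached under Pre_),
-- per-sequence first-element set, overlap count, one output record, and the
-- canonical form both ports are reduced to.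
def pvHd (v : List Int) : Int := PySem.List.pyGetD v 0 0
def pvFset (seq : List (List Int)) : PySem.Set Int := PySem.Set.ofList (seq.map pvHd)
def pvOv (seq1 seq2 : List (List Int)) : Nat :=
  (pvFset seq1).countP (fun x => PySem.Set.contains (pvFset seq2) x)
def pvEntry (seq1 seq2 : List (List Int)) : List (String × List (List Int)) :=
  [("sensors", seq2), ("matches", seq1)]
def pvCanon (sequences1 sequences2 : List (List (List Int))) (amount_overlapped : Int) : List (List (String × List (List Int))) :=
  sequences1.flatMap (fun seq1 =>
    ((sequences2.filter (fun seq2 => decide (amount_overlapped ≤ (pvOv seq1 seq2 : Int)))).map (fun seq2 => pvEntry seq1 seq2)))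
-- the multiset of (element, index) pairs fed into the inverted index
def pvP (L : List (PySem.Set Int)) : List (Int × Int) :=
  (PySem.List.enumerate L 0).flatMap (fun p => p.2.map (fun v => (v, p.1)))

theorem pvFirstSetB_eq (seq : List (List Int)) : pvFirstSetB seq = pvFset seq := by
  unfold pvFirstSetB pvFset
  rw [PySem.Set.ofList_eq_foldl, List.foldl_map]
  rfl

theorem match_single_eq (seq1 seq2 : List (List Int)) (amt : Int) :
    match_single_seq seq1 seq2 amt = decide (amt ≤ (pvOv seq1 seq2 : Int)) := by
  unfold match_single_seq
  rw [PySem.List.foldl_append_singleton_eq_map, PySem.List.foldl_append_singleton_eq_map]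
  simp only [List.nil_append]
  have h : PySem.Set.len (PySem.Set.inter (PySem.Set.ofList (seq1.map (fun v => PySem.List.pyGetD v 0 0)))
      (PySem.Set.ofList (seq2.map (fun v => PySem.List.pyGetD v 0 0)))) = ((pvOv seq1 seq2 : Nat) : Int) := by
    show (((pvFset seq1).filter (fun x => PySem.Set.contains (pvFset seq2) x)).length : Int) = _
    rw [← List.countP_eq_length_filter]
    rfl
  simp only [h]

theorem items_eq (seq1 seq2 : List (List Int)) :
    (((PySem.Dict.empty.insert "sensors" seq2).insert "matches" seq1).items) = pvEntry seq1 seq2 := rfl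

theorem A_eq_canon (s1 s2 : List (List (List Int))) (amt : Int) :
    match_multiple_seq s1 s2 amt = pvCanon s1 s2 amt := by
  unfold match_multiple_seq pvCanon
  rw [PySem.List.foldl_congr_mem s1 _
    (fun out seq1 => out ++ ((s2.filter (fun seq2 => decide (amt ≤ (pvOv seq1 seq2 : Int)))).map (fun seq2 => pvEntry seq1 seq2))) []
    ?_]
  · rw [PySem.List.foldl_append_eq_flatMap, List.nil_append]
  · intro acc seq1 _
    rw [PySem.List.foldl_congr_mem s2 _
      (fun out seq2 => if decide (amt ≤ (pvOv seq1 seq2 : Int)) = true then out ++ [pvEntry seq1 seq2] else out) acc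
      ?_]
    · exact PySem.List.foldl_append_if _ _ _ _
    · intro acc2 seq2 _
      rw [match_single_eq, items_eq]

theorem pvP_nodup (L : List (PySem.Set Int)) (hL : ∀ f ∈ L, List.Nodup f) : (pvP L).Nodup := by
  unfold pvP
  rw [List.nodup_flatMap]
  constructor
  · intro p hp
    rcases (PySem.List.mem_enumerate_iff L 0 p).mp hp with ⟨k, hk, rfl⟩
    exact (hL _ (List.getElem_mem hk)).map (fun a b h => congrArg Prod.fst h)
  · have := PySem.List.pairwise_lt_enumerate L 0
    exact this.imp (fun {p q} h => by
      simp only [Function.onFun]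
      rw [List.disjoint_left]
      rintro x hx hx'
      rcases List.mem_map.mp hx with ⟨a, _, rfl⟩
      rcases List.mem_map.mp hx' with ⟨b, _, hb⟩
      exact absurd (congrArg Prod.snd hb).symm (by simpa using Int.ne_of_lt h))

theorem pvP_mem (L : List (PySem.Set Int)) (v j : Int) :
    (v, j) ∈ pvP L ↔ ∃ k : Nat, ∃ _ : k < L.length, j = (k : Int) ∧ v ∈ L[k] := by
  unfold pvP
  rw [List.mem_flatMap]
  constructor
  · rintro ⟨p, hp, hm⟩
    rcases (PySem.List.mem_enumerate_iff L 0 p).mp hp with ⟨k, hk, rfl⟩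
    rcases List.mem_map.mp hm with ⟨a, ha, hae⟩
    injection hae with h1 h2
    subst h1
    exact ⟨k, hk, by omega, ha⟩
  · rintro ⟨k, hk, rfl, hv⟩
    refine ⟨((k : Int), L[k]), (PySem.List.mem_enumerate_iff L 0 _).mpr ⟨k, hk, by simp⟩, ?_⟩
    exact List.mem_map.mpr ⟨v, hv, rfl⟩

theorem inv_getD (L : List (PySem.Set Int)) (v : Int) :
    (pvBuildInv L).getD v [] = ((pvP L).filter (fun q => q.1 == v)).map (fun q => q.2) := by
  unfold pvBuildInv pvP
  rw [PySem.List.foldl_congr_mem _ _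
    (fun d p => ((p.2.map (fun v => (v, p.1))) : List (Int × Int)).foldl (fun d q => d.modify q.1 [] (· ++ [q.2])) d) _
    (by intro d p _
        show List.foldl (fun d v => d.modify v [] (· ++ [p.1])) d p.2
            = List.foldl (fun d q => d.modify q.1 [] (· ++ [q.2])) d (p.2.map (fun v => (v, p.1)))
        rw [List.foldl_map])]
  rw [← List.foldl_flatMap]
  rw [PySem.Dict.getD_foldl_modify_append]
  simp

theorem count_inv (L : List (PySem.Set Int)) (hL : ∀ f ∈ L, List.Nodup f) (v : Int) (k : Nat) (hk : k < L.length) :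
    ((pvBuildInv L).getD v []).count (k : Int) = if v ∈ L[k] then 1 else 0 := by
  rw [inv_getD]
  have h1 : (((pvP L).filter (fun q => q.1 == v)).map (fun q => q.2)).count (k : Int)
      = (pvP L).count (v, (k : Int)) := by
    rw [List.count_eq_countP, List.countP_map, List.countP_filter, List.count_eq_countP]
    apply List.countP_congr
    rintro ⟨a, b⟩ _
    show ((b == (k:Int)) && (a == v)) = true ↔ ((a, b) == (v, (k:Int))) = true
    simp only [Bool.and_eq_true, beq_iff_eq, Prod.mk.injEq]
    tauto
  rw [h1]
  by_cases hm : (v, (k : Int)) ∈ pvP L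
  · rw [if_pos (((pvP_mem L v _).mp hm).elim (fun k' ⟨hk', he, hv⟩ => by
      obtain rfl : k' = k := by exact_mod_cast he.symm
      exact hv))]
    exact List.count_eq_one_of_mem (pvP_nodup L hL) hm
  · rw [if_neg (fun hv => hm ((pvP_mem L v _).mpr ⟨k, hk, rfl, hv⟩))]
    exact List.count_eq_zero_of_not_mem hm

theorem pvBump (J : List Int) : ∀ (c : List Int),
    (∀ j ∈ J, ∃ m : Nat, j = (m : Int) ∧ m < c.length) → ∀ (k : Nat), k < c.length →
    (J.foldl (fun c j => PySem.List.pySetD c j (PySem.List.pyGetD c j 0 + 1)) c).getD k 0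
      = c.getD k 0 + (J.count (k : Int) : Int) := by
  induction J with
  | nil => intro c _ k _; simp
  | cons j t ih =>
    intro c hJ k hk
    rcases hJ j List.mem_cons_self with ⟨m, rfl, hm⟩
    simp only [List.foldl_cons, PySem.List.pySetD_natCast, PySem.List.pyGetD_natCast]
    rw [ih (c.set m (c.getD m 0 + 1))
      (fun j hj => by
        rcases hJ j (List.mem_cons_of_mem _ hj) with ⟨m', rfl, hm'⟩
        exact ⟨m', rfl, by simpa using hm'⟩)
      k (by simpa using hk)]
    rw [List.count_cons]
    by_cases hkm : m = k
    · subst hkm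
      have : (c.set m (c.getD m 0 + 1)).getD m 0 = c.getD m 0 + 1 := by
        simp [List.getD, hm]
      rw [this]
      simp
      omega
    · have : (c.set m (c.getD m 0 + 1)).getD k 0 = c.getD k 0 := by
        simp [List.getD, hkm]
      rw [this]
      have : ¬ ((m : Int) = (k : Int)) := by exact_mod_cast hkm
      simp [this]

theorem pvCountFlat (l : List Int) (g : Int → List Int) (a : Int) :
    (l.flatMap g).count a = (l.map (fun x => (g x).count a)).sum := by
  induction l with
  | nil => simp
  | cons x t ih => simp [List.count_append, ih]

theorem pvSumIte (l : List Int) (p : Int → Prop) [DecidablePred p] :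
    (l.map (fun v => if p v then (1:Nat) else 0)).sum = l.countP (fun v => decide (p v)) := by
  induction l with
  | nil => rfl
  | cons x t ih => by_cases h : p x <;> simp [ih, h, Nat.add_comm]

theorem counts_getD (s2 : List (List (List Int))) (seq1 : List (List Int)) (k : Nat) (hk : k < s2.length) :
    (pvOverlapCounts (pvFset seq1) (pvBuildInv (s2.map pvFset)) (s2.length : Int)).getD k 0
      = (pvOv seq1 s2[k] : Int) := by
  unfold pvOverlapCounts
  rw [PySem.List.pyRepeat_singleton]
  simp only [Int.toNat_natCast]
  rw [← List.foldl_flatMap]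
  have hlen : (List.replicate s2.length (0:Int)).length = s2.length := List.length_replicate
  have hdom : ∀ j ∈ (pvFset seq1).flatMap (fun v => (pvBuildInv (s2.map pvFset)).getD v []),
      ∃ m : Nat, j = (m : Int) ∧ m < (List.replicate s2.length (0:Int)).length := by
    intro j hj
    rcases List.mem_flatMap.mp hj with ⟨v, _, hjv⟩
    rw [inv_getD] at hjv
    rcases List.mem_map.mp hjv with ⟨q, hq, rfl⟩
    have hqP : q ∈ pvP (s2.map pvFset) := List.mem_filter.mp hq |>.1
    have : (q.1, q.2) ∈ pvP (s2.map pvFset) := by simpa using hqP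
    rcases (pvP_mem _ _ _).mp this with ⟨m, hm, he, _⟩
    exact ⟨m, he, by simpa using hm⟩
  rw [pvBump _ _ hdom k (by simpa using hk)]
  have h0 : (List.replicate s2.length (0:Int)).getD k 0 = 0 := by
    simp [List.getD]
  rw [h0, pvCountFlat, zero_add, Nat.cast_inj]
  have hnodup : ∀ f ∈ s2.map pvFset, List.Nodup f := by
    intro f hf
    rcases List.mem_map.mp hf with ⟨seq, _, rfl⟩
    exact PySem.Set.nodup_ofList _
  have hmap : (pvFset seq1).map (fun v => ((pvBuildInv (s2.map pvFset)).getD v []).count (k : Int))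
      = (pvFset seq1).map (fun v => if v ∈ pvFset s2[k] then 1 else 0) :=
    List.map_congr_left (fun v _ => by
      rw [count_inv _ hnodup v k (by simpa using hk)]
      simp)
  rw [hmap, pvSumIte]
  unfold pvOv
  apply List.countP_congr
  intro x _
  simp

theorem enum_filter_map {β : Type} (xs : List (List (List Int))) (s : Int)
    (pr : List (List Int) → Bool) (f : List (List Int) → β) :
    ((PySem.List.enumerate xs s).filter (fun p => pr p.2)).map (fun p => f p.2)
      = (xs.filter pr).map f := by
  have h1 : ((PySem.List.enumerate xs s).filter (fun p => pr p.2)).map (fun p => f p.2)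
      = (((PySem.List.enumerate xs s).filter (fun p => pr p.2)).map (fun p => p.2)).map f := by
    rw [List.map_map]; rfl
  rw [h1]
  have h2 : ((PySem.List.enumerate xs s).map (fun p => p.2)).filter pr
      = ((PySem.List.enumerate xs s).filter (fun p => pr p.2)).map (fun p => p.2) := by
    rw [List.filter_map]; rfl
  rw [← h2, PySem.List.map_snd_enumerate]

theorem B_eq_canon (s1 s2 : List (List (List Int))) (amt : Int) :
    match_multiple_seq_alt s1 s2 amt = pvCanon s1 s2 amt := by
  unfold match_multiple_seq_alt pvCanon
  rw [PySem.List.foldl_append_singleton_eq_map, List.nil_append]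
  have hfs : s2.map pvFirstSetB = s2.map pvFset := List.map_congr_left (fun seq _ => pvFirstSetB_eq seq)
  rw [hfs]
  rw [PySem.List.foldl_congr_mem s1 _
    (fun out seq1 => out ++ ((s2.filter (fun seq2 => decide (amt ≤ (pvOv seq1 seq2 : Int)))).map (fun seq2 => pvEntry seq1 seq2))) []
    ?_]
  · rw [PySem.List.foldl_append_eq_flatMap, List.nil_append]
  · intro acc seq1 _
    show (PySem.List.enumerate s2 0).foldl (fun out p =>
        if amt ≤ PySem.List.pyGetD (pvOverlapCounts (pvFirstSetB seq1) (pvBuildInv (s2.map pvFset)) (s2.length : Int)) p.1 0 then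
          out ++ [[("sensors", p.2), ("matches", seq1)]]
        else out) acc
      = acc ++ ((s2.filter (fun seq2 => decide (amt ≤ (pvOv seq1 seq2 : Int)))).map (fun seq2 => pvEntry seq1 seq2))
    rw [pvFirstSetB_eq]
    rw [PySem.List.foldl_congr_mem _ _
      (fun out (p : Int × List (List Int)) => if amt ≤ (pvOv seq1 p.2 : Int) then out ++ [pvEntry seq1 p.2] else out) acc
      (by intro acc2 p hp
          rcases (PySem.List.mem_enumerate_iff s2 0 p).mp hp with ⟨k, hk, rfl⟩
          have hc : PySem.List.pyGetD (pvOverlapCounts (pvFset seq1) (pvBuildInv (s2.map pvFset)) (s2.length : Int)) ((0:Int) + (k:Int)) 0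
              = (pvOv seq1 s2[k] : Int) := by
            rw [zero_add, PySem.List.pyGetD_natCast]
            exact counts_getD s2 seq1 k hk
          rw [hc]
          rfl)]
    have hfold := PySem.List.foldl_append_ite (p := fun (q : Int × List (List Int)) => amt ≤ (pvOv seq1 q.2 : Int))
      (f := fun (q : Int × List (List Int)) => pvEntry seq1 q.2) (l := PySem.List.enumerate s2 0) (acc := acc)
    rw [hfold]
    rw [enum_filter_map s2 0 (fun x => decide (amt ≤ (pvOv seq1 x : Int))) (fun x => pvEntry seq1 x)]

-- ===== VERDICT (by name: the statement is the Claim_ definition above) =====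
theorem match_multiple_seq_spec : Claim_equal_match_multiple_seq := by
  intro s1 s2 amt _ _
  unfold Spec_match_multiple_seq
  rw [A_eq_canon, B_eq_canon]
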